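-- pv_equiv track=rewrite | github.com/LocalPulse/AI-Hackathon | src/utils/state_sync.py | _calculate_stats_from_tracks
-- ===== SOURCE A (Python) =====
-- from typing import Dict, List
--
-- def _calculate_stats_from_tracks(tracks: List[Dict]) -> Dict[str, int]:
--     """Calculate statistics from track list."""
--     stats = {'person': 0, 'train': 0, 'total': 0}
--     for track in tracks:
--         class_name = track.get('class_name', 'unknown')
--         if class_name == 'person':
--             stats['person'] += 1
--         elif class_name == 'train':
--             stats['train'] += 1
--         stats['total'] += 1
--     return stats
-- ===== SOURCE B (Python) =====
-- from typing import Dict, List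
--
-- def _calculate_stats_from_tracks(tracks: List[Dict]) -> Dict[str, int]:
--     """Calculate statistics from track list."""
--     names = [track.get('class_name', 'unknown') for track in tracks]
--     return {'person': names.count('person'),
--             'train': names.count('train'),
--             'total': len(names)}
-- ===== Notes on version B (the rewrite author's own statement) =====
-- stated objective: simpler
-- what changed: Replaces the stateful loop with three hand-rolled counters and if/elif branching by mapping tracks to their class names once and building the result dict directly from names.count('person'), names.count('train') and len(names).
import Mathlib
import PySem

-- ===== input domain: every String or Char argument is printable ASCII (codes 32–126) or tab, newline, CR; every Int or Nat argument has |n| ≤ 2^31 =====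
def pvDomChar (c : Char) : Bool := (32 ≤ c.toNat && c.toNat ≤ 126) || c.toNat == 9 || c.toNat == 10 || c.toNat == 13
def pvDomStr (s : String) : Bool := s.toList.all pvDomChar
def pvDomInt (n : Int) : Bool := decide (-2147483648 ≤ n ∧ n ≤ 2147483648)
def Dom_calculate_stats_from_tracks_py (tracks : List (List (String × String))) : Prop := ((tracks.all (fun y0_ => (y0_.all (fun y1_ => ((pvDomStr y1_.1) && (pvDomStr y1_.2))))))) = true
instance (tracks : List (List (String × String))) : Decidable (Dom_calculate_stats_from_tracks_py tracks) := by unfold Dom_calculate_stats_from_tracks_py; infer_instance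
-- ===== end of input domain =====

-- B is a simpler decomposition: map tracks to their class names once and count, instead of A's stateful loop; same O(n) cost.
-- ===== PORT A =====
-- A-side helper: the body of A's for-loop, named so the proofs can speak about one step
def pvLoopBody (stats : PySem.Dict String Int) (track : List (String × String)) : PySem.Dict String Int :=
  let class_name := (PySem.Dict.mk track).getD "class_name" "unknown"
  let stats :=
    if class_name == "person" then stats.modify "person" 0 (· + 1)
    else if class_name == "train" then stats.modify "train" 0 (· + 1)
    else stats
  stats.modify "total" 0 (· + 1)

def calculate_stats_from_tracks_py (tracks : List (List (String × String))) : List (String × Int) :=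
  let stats : PySem.Dict String Int := PySem.Dict.mk [("person", 0), ("train", 0), ("total", 0)]
  (tracks.foldl pvLoopBody stats).items

-- ===== PORT B =====
def calculate_stats_from_tracks_py_alt (tracks : List (List (String × String))) : List (String × Int) :=
  let names := tracks.map (fun track => (PySem.Dict.mk track).getD "class_name" "unknown")
  [("person", (names.count "person" : Int)),
   ("train", (names.count "train" : Int)),
   ("total", (names.length : Int))]

-- ===== PRECONDITION & SPEC =====
def Spec_calculate_stats_from_tracks_py (tracks : List (List (String × String))) (out : List (String × Int)) : Prop := out = calculate_stats_from_tracks_py_alt tracks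
instance (tracks : List (List (String × String))) (out : List (String × Int)) : Decidable (Spec_calculate_stats_from_tracks_py tracks out) := by unfold Spec_calculate_stats_from_tracks_py; infer_instance

-- ===== CLAIM (what is proved, stated in full; the proofs are below) =====
def Claim_equal_calculate_stats_from_tracks_py : Prop := ∀ (tracks : List (List (String × String))), Dom_calculate_stats_from_tracks_py tracks → Spec_calculate_stats_from_tracks_py tracks (calculate_stats_from_tracks_py tracks)

-- ===== LEMMAS AND PROOFS =====

-- one loop step on the three-key literal dict, in closed form
theorem pv_step (track : List (String × String)) (p t tot : Int) :
    pvLoopBody (PySem.Dict.mk [("person", p), ("train", t), ("total", tot)]) track =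
    PySem.Dict.mk
      [("person", p + if (PySem.Dict.mk track).getD "class_name" "unknown" = "person" then 1 else 0),
       ("train", t + if (PySem.Dict.mk track).getD "class_name" "unknown" = "train" then 1 else 0),
       ("total", tot + 1)] := by
  unfold pvLoopBody
  simp only [beq_iff_eq]
  by_cases hp : (PySem.Dict.mk track).getD "class_name" "unknown" = "person"
  · simp only [hp, if_pos]
    simp [PySem.Dict.modify, PySem.Dict.insert, PySem.Dict.getD, PySem.Dict.get?, PySem.Dict.contains]
  · by_cases ht : (PySem.Dict.mk track).getD "class_name" "unknown" = "train"
    · simp only [ht, if_pos]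
      simp [PySem.Dict.modify, PySem.Dict.insert, PySem.Dict.getD, PySem.Dict.get?, PySem.Dict.contains]
    · simp only [if_neg hp, if_neg ht]
      simp [PySem.Dict.modify, PySem.Dict.insert, PySem.Dict.getD, PySem.Dict.get?, PySem.Dict.contains]

-- invariant of A's whole loop: the fold adds the class-name counts to the three entries
theorem pv_foldl_stats (tracks : List (List (String × String))) (p t tot : Int) :
    tracks.foldl pvLoopBody (PySem.Dict.mk [("person", p), ("train", t), ("total", tot)]) =
    PySem.Dict.mk
      [("person", p + ((tracks.map (fun track => (PySem.Dict.mk track).getD "class_name" "unknown")).count "person" : Int)),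
       ("train", t + ((tracks.map (fun track => (PySem.Dict.mk track).getD "class_name" "unknown")).count "train" : Int)),
       ("total", tot + (tracks.length : Int))] := by
  induction tracks generalizing p t tot with
  | nil => simp
  | cons hd tl ih =>
    simp only [List.foldl_cons, List.map_cons, List.length_cons, pv_step, ih]
    simp only [List.count_cons, beq_iff_eq, PySem.Dict.mk.injEq, List.cons.injEq, Prod.mk.injEq,
      and_true, true_and]
    refine ⟨?_, ?_, ?_⟩
    · split_ifs with h1 <;> push_cast <;> omega
    · split_ifs with h1 <;> push_cast <;> omega
    · push_cast; ring

theorem calculate_stats_from_tracks_py_spec : Claim_equal_calculate_stats_from_tracks_py := by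
  intro tracks _
  unfold Spec_calculate_stats_from_tracks_py calculate_stats_from_tracks_py calculate_stats_from_tracks_py_alt
  simp [pv_foldl_stats]
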